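-- pv_equiv track=rewrite | github.com/Taztingo/hacker_rank | src/WeekOfCoding28/TheGreatXor/Python3/main.py | count_match_criteria
-- ===== SOURCE A (Python) =====
-- def meets_criteria(value, maximum):
--   return (value ^ maximum) > maximum
--
-- def count_match_criteria(maximum, cache):
--   counter = 0
--   if maximum not in cache:
--     for value in range(maximum - 1):
--       if meets_criteria(value + 1, maximum):
--         counter += 1
--       cache[maximum] = counter
--   else:
--     counter = cache[maximum]
--   return counter
-- ===== SOURCE B (Python) =====
-- def count_match_criteria(maximum, cache):
--     # closed form: x^maximum > maximum iff the highest set bit of x falls on a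
--     # zero bit of maximum; summing 2^i over the zero bits below the MSB counts them.
--     if maximum in cache:
--         return cache[maximum]
--     counter = 0
--     bit = 1
--     while bit * 2 <= maximum:
--         if maximum & bit == 0:
--             counter += bit
--         bit *= 2
--     cache[maximum] = counter
--     return counter
-- ===== Notes on version B (the rewrite author's own statement) =====
-- stated objective: alternative
-- what changed: replaces A's scan of every value below maximum (testing value^maximum>maximum) with a bit loop over maximum's binary digits that adds 2^i for each zero bit of maximum below its most significant bit; intended as faster on cache misses (measured 1.65x median at the largest size, not consistently confirmed)
import Mathlib
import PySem

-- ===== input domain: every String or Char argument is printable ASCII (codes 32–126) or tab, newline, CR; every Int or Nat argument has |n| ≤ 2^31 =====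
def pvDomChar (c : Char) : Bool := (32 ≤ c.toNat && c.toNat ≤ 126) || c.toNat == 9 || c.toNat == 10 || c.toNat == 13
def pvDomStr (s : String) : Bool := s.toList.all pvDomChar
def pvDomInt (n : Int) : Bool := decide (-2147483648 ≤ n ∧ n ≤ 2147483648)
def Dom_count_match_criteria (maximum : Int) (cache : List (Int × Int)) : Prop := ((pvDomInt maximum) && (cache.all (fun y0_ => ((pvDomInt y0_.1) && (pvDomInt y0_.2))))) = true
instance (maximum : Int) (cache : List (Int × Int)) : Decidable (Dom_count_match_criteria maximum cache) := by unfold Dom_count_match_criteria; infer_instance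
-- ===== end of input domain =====

-- B computes the count in closed form — a bit loop adding 2^i for each zero bit of maximum
-- below its most significant bit — instead of scanning every value below maximum.
-- Equivalence is about the RETURN value only: in Python both write cache[maximum] on a
-- cache miss (A only when its range is non-empty).

-- ===== PORT A =====
def meetsCriteria (value maximum : Int) : Bool := decide (PySem.Int.bxor value maximum > maximum)

def count_match_criteria (maximum : Int) (cache : List (Int × Int)) : Int :=
  let d := PySem.Dict.mk cache
  if !(d.contains maximum) then
    ((PySem.List.pyRange 0 (maximum - 1) 1).foldl
      (fun (st : Int × PySem.Dict Int Int) value =>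
        let counter := if meetsCriteria (value + 1) maximum then st.1 + 1 else st.1
        (counter, st.2.insert maximum counter)) (0, d)).1
  else d.getD maximum 0

-- ===== PORT B =====
-- the '1 ≤ bit' conjunct is a totality guard only: bit starts at 1 and doubles, so it always holds
def pvAltLoop (maximum bit counter : Int) : Int :=
  if h : bit * 2 ≤ maximum ∧ 1 ≤ bit then
    pvAltLoop maximum (bit * 2) (if PySem.Int.band maximum bit = 0 then counter + bit else counter)
  else counter
termination_by (maximum - bit).toNat
decreasing_by omega

def count_match_criteria_alt (maximum : Int) (cache : List (Int × Int)) : Int :=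
  let d := PySem.Dict.mk cache
  if d.contains maximum then d.getD maximum 0
  else pvAltLoop maximum 1 0

-- ===== PRECONDITION & SPEC =====
def Spec_count_match_criteria (maximum : Int) (cache : List (Int × Int)) (out : Int) : Prop := out = count_match_criteria_alt maximum cache
instance (maximum : Int) (cache : List (Int × Int)) (out : Int) : Decidable (Spec_count_match_criteria maximum cache out) := by unfold Spec_count_match_criteria; infer_instance

-- ===== CLAIM (what is proved, stated in full; the proofs are below) =====
def Claim_equal_count_match_criteria : Prop := ∀ (maximum : Int) (cache : List (Int × Int)), Dom_count_match_criteria maximum cache → Spec_count_match_criteria maximum cache (count_match_criteria maximum cache)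

-- ===== LEMMAS AND PROOFS =====

-- A's fold carries (counter, cache); the cache component never feeds back into the counter.
theorem pvFoldFst (l : List Int) (maximum : Int) (c0 : Int) (d0 : PySem.Dict Int Int) :
    ((l.foldl (fun (st : Int × PySem.Dict Int Int) value =>
        let counter := if meetsCriteria (value + 1) maximum then st.1 + 1 else st.1
        (counter, st.2.insert maximum counter)) (c0, d0)).1)
    = l.foldl (fun c value => if meetsCriteria (value + 1) maximum then c + 1 else c) c0 := by
  induction l generalizing c0 d0 with
  | nil => rfl
  | cons x xs ih => simp only [List.foldl]; split <;> exact ih ..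

theorem pvFoldCount {α : Type} (P : α → Bool) (l : List α) (c : Int) :
    l.foldl (fun c v => if P v then c + 1 else c) c = c + (l.countP P : Int) := by
  induction l generalizing c with
  | nil => simp
  | cons x xs ih =>
    simp only [List.foldl, List.countP_cons]
    split <;> simp_all <;> push_cast <;> ring

theorem pvCountPSum (p : Nat → Prop) [DecidablePred p] (n : Nat) :
    (((List.range n).countP (fun k => decide (p k))) : Int)
      = ∑ x ∈ Finset.range n, (if p x then (1:Int) else 0) := by
  induction n with
  | zero => simp
  | succ n ih =>
    rw [List.range_succ, List.countP_append, Finset.sum_range_succ, ← ih]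
    by_cases hp : p n <;> simp [hp, List.countP_cons] <;> push_cast <;> ring

-- the target count, as an integer-valued indicator sum over Finset.range
def pvCnt (m : Nat) : Int := ∑ x ∈ Finset.range m, (if m < x ^^^ m then (1 : Int) else 0)

theorem pvSumTwoMul (g : ℕ → ℤ) (q : ℕ) :
    ∑ x ∈ Finset.range (2*q), g x = ∑ y ∈ Finset.range q, (g (2*y) + g (2*y+1)) := by
  induction q with
  | zero => simp
  | succ q ih =>
    rw [Nat.mul_succ, Finset.sum_range_succ, Finset.sum_range_succ, Finset.sum_range_succ]
    omega

theorem pvTestBitAdd (a c i : Nat) (hc : c < 2) :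
    (2*a + c).testBit (i+1) = a.testBit i ∧ (2*a + c).testBit 0 = decide (c = 1) := by
  constructor
  · rw [Nat.testBit_succ]
    congr 1; omega
  · rw [Nat.testBit_zero]
    simp only [decide_eq_decide]; omega

theorem pvXorAdd (a b c d : Nat) (hc : c < 2) (hd : d < 2) :
    (2*a + c) ^^^ (2*b + d) = 2*(a ^^^ b) + (c ^^^ d) := by
  apply Nat.eq_of_testBit_eq
  intro i
  have hcd : (c ^^^ d) < 2 := by interval_cases c <;> interval_cases d <;> decide
  cases i with
  | zero =>
    rw [Nat.testBit_xor, (pvTestBitAdd a c 0 hc).2, (pvTestBitAdd b d 0 hd).2,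
        (pvTestBitAdd (a ^^^ b) (c ^^^ d) 0 hcd).2]
    interval_cases c <;> interval_cases d <;> decide
  | succ i =>
    rw [Nat.testBit_xor, (pvTestBitAdd a c i hc).1, (pvTestBitAdd b d i hd).1,
        (pvTestBitAdd (a ^^^ b) (c ^^^ d) i hcd).1, Nat.testBit_xor]

theorem pvAndAdd (a b c d : Nat) (hc : c < 2) (hd : d < 2) :
    (2*a + c) &&& (2*b + d) = 2*(a &&& b) + (c &&& d) := by
  apply Nat.eq_of_testBit_eq
  intro i
  have hcd : (c &&& d) < 2 := by interval_cases c <;> interval_cases d <;> decide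
  cases i with
  | zero =>
    rw [Nat.testBit_and, (pvTestBitAdd a c 0 hc).2, (pvTestBitAdd b d 0 hd).2,
        (pvTestBitAdd (a &&& b) (c &&& d) 0 hcd).2]
    interval_cases c <;> interval_cases d <;> decide
  | succ i =>
    rw [Nat.testBit_and, (pvTestBitAdd a c i hc).1, (pvTestBitAdd b d i hd).1,
        (pvTestBitAdd (a &&& b) (c &&& d) i hcd).1, Nat.testBit_and]

theorem pvXorEqSelf (y q : Nat) : y ^^^ q = q ↔ y = 0 := by
  constructor
  · intro h; have := congrArg (· ^^^ q) h; simpa [Nat.xor_assoc] using this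
  · intro h; simp [h]

-- recurrence for the count: pvCnt (2q+b) = 2 * pvCnt q + [b = 0 ∧ 1 ≤ q]
theorem pvCntRec (q b : Nat) (hb : b < 2) :
    pvCnt (2*q + b) = 2 * pvCnt q + (if b = 0 ∧ 1 ≤ q then 1 else 0) := by
  unfold pvCnt
  have hsplit : ∀ g : ℕ → ℤ, ∑ x ∈ Finset.range (2*q + b), g x
      = (∑ y ∈ Finset.range q, (g (2*y) + g (2*y+1))) + (if b = 1 then g (2*q) else 0) := by
    intro g
    interval_cases b
    · simp [pvSumTwoMul g q]
    · rw [Finset.sum_range_succ, pvSumTwoMul g q]; simp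
  rw [hsplit]
  have heval : ∀ y c, c < 2 →
      ((if 2*q + b < (2*y + c) ^^^ (2*q + b) then (1:Int) else 0)
        = if (q < y ^^^ q) ∨ (y ^^^ q = q ∧ c = 1 ∧ b = 0) then 1 else 0) := by
    intro y c hc
    rw [pvXorAdd y q c b hc hb]
    refine if_congr ?_ rfl rfl
    interval_cases c <;> interval_cases b <;>
      simp only [Nat.zero_xor, Nat.xor_zero, Nat.xor_self, and_true, true_and] <;> omega
  have hpair : ∀ y ∈ Finset.range q,
      ((if 2*q + b < (2*y) ^^^ (2*q + b) then (1:Int) else 0)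
        + (if 2*q + b < (2*y + 1) ^^^ (2*q + b) then (1:Int) else 0))
      = 2 * (if q < y ^^^ q then (1:Int) else 0) + (if y = 0 ∧ b = 0 then 1 else 0) := by
    intro y hy
    have h0 := heval y 0 (by omega)
    rw [Nat.add_zero] at h0
    have h1 := heval y 1 (by omega)
    rw [h0, h1]
    have hyq := pvXorEqSelf y q
    by_cases hlt : q < y ^^^ q
    · have h2 : ¬ (y = 0) := by rintro rfl; simp at hlt
      have h3 : ¬ (y ^^^ q = q) := by omega
      simp [hlt, h2, h3]
    · by_cases hy0 : y = 0
      · have h3 : y ^^^ q = q := hyq.mpr hy0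
        by_cases hb0 : b = 0 <;> simp [hlt, hy0, h3, hb0] <;> ring
      · have h3 : ¬ (y ^^^ q = q) := fun h => hy0 (hyq.mp h)
        simp [hlt, h3, hy0]
  rw [Finset.sum_congr rfl hpair]
  have hlast : (if b = 1 then (if 2*q + b < (2*q) ^^^ (2*q + b) then (1:Int) else 0) else 0) = 0 := by
    by_cases hb1 : b = 1
    · subst hb1
      rw [if_pos rfl,
        show (2*q) ^^^ (2*q + 1) = 2*(q ^^^ q) + (0 ^^^ 1) by
          simpa using pvXorAdd q q 0 1 (by omega) (by omega)]
      simp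
    · simp [hb1]
  rw [hlast, Finset.sum_add_distrib, ← Finset.mul_sum]
  have hind : (∑ y ∈ Finset.range q, (if y = 0 ∧ b = 0 then (1:Int) else 0))
      = if b = 0 ∧ 1 ≤ q then 1 else 0 := by
    have h4 : ∀ y ∈ Finset.range q, (if y = 0 ∧ b = 0 then (1:Int) else 0)
        = if y = 0 then (if b = 0 then (1:Int) else 0) else 0 := by
      intro y _; by_cases hy : y = 0 <;> by_cases hb0 : b = 0 <;> simp [hy, hb0]
    rw [Finset.sum_congr rfl h4, Finset.sum_ite_eq' (Finset.range q) 0]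
    by_cases hq : 1 ≤ q <;> by_cases hb0 : b = 0 <;>
      simp [Finset.mem_range, hq, hb0] <;> omega
  rw [hind]
  ring

-- pvAltLoop shifts its accumulator
theorem pvAltLoopAcc (maximum bit c : Int) :
    pvAltLoop maximum bit c = c + pvAltLoop maximum bit 0 := by
  by_cases h : bit * 2 ≤ maximum ∧ 1 ≤ bit
  · conv_lhs => rw [pvAltLoop]
    conv_rhs => rw [pvAltLoop]
    rw [dif_pos h, dif_pos h]
    rw [pvAltLoopAcc maximum (bit*2) (if PySem.Int.band maximum bit = 0 then c + bit else c),
        pvAltLoopAcc maximum (bit*2) (if PySem.Int.band maximum bit = 0 then 0 + bit else 0)]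
    split <;> ring
  · conv_lhs => rw [pvAltLoop]
    conv_rhs => rw [pvAltLoop]
    rw [dif_neg h, dif_neg h]
    ring
termination_by (maximum - bit).toNat
decreasing_by all_goals omega

-- doubling both the number and the bit doubles the rest of the loop's sum
theorem pvAltLoopShift (n : Nat) : ∀ (t q b : Nat), q - t < n → b < 2 → 1 ≤ t →
    pvAltLoop (2*(q:Int) + b) (2*(t:Int)) 0 = 2 * pvAltLoop (q:Int) (t:Int) 0 := by
  induction n with
  | zero => omega
  | succ n ih =>
    intro t q b hn hb ht
    by_cases hc : (t:Int) * 2 ≤ (q:Int) ∧ 1 ≤ (t:Int)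
    · have hc2 : (2*(t:Int)) * 2 ≤ 2*(q:Int) + b ∧ 1 ≤ 2*(t:Int) := by
        constructor <;> [push_cast; skip] <;> omega
      rw [pvAltLoop, dif_pos hc2]
      conv_rhs => rw [pvAltLoop, dif_pos hc]
      have hband : PySem.Int.band (2*(q:Int) + b) (2*(t:Int)) = ((2*q + b) &&& (2*t) : Nat) := by
        push_cast [← PySem.Int.band_natCast]; ring_nf
      have hbandq : PySem.Int.band (q:Int) (t:Int) = ((q &&& t : Nat) : Int) :=
        PySem.Int.band_natCast q t
      have hand : (2*q + b) &&& (2*t) = 2*(q &&& t) + (b &&& 0) := pvAndAdd q t b 0 hb (by omega)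
      have hzero : (PySem.Int.band (2*(q:Int) + b) (2*(t:Int)) = 0) ↔ (PySem.Int.band (q:Int) (t:Int) = 0) := by
        rw [hband, hbandq, hand, Nat.and_zero]
        omega
      rw [pvAltLoopAcc, pvAltLoopAcc ((q:Int)) ((t:Int)*2)]
      have hrec : pvAltLoop (2*(q:Int) + b) (2*(t:Int) * 2) 0 = 2 * pvAltLoop (q:Int) ((t:Int)*2) 0 := by
        have : (2*(t:Int)) * 2 = 2 * ((2*t : Nat) : Int) := by push_cast; ring
        rw [this]
        have : ((t:Int)) * 2 = ((2*t : Nat) : Int) := by push_cast; ring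
        rw [this]
        exact ih (2*t) q b (by omega) hb (by omega)
      rw [hrec]
      by_cases hz : PySem.Int.band (q:Int) (t:Int) = 0
      · rw [if_pos (hzero.mpr hz), if_pos hz]; push_cast; ring
      · rw [if_neg (fun h => hz (hzero.mp h)), if_neg hz]; ring
    · have hc2 : ¬ ((2*(t:Int)) * 2 ≤ 2*(q:Int) + b ∧ 1 ≤ 2*(t:Int)) := by
        intro h; apply hc; constructor <;> [push_cast at h ⊢; skip] <;> omega
      rw [pvAltLoop, dif_neg hc2, pvAltLoop, dif_neg hc]
      ring

-- recurrence for B's loop result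
theorem pvAltLoopRec (q b : Nat) (hb : b < 2) :
    pvAltLoop (2*(q:Int) + b) 1 0 = 2 * pvAltLoop (q:Int) 1 0 + (if b = 0 ∧ 1 ≤ q then 1 else 0) := by
  by_cases hq : 1 ≤ q
  · have hc : (1:Int) * 2 ≤ 2*(q:Int) + b ∧ 1 ≤ (1:Int) := by constructor <;> omega
    rw [pvAltLoop, dif_pos hc]
    have hband : PySem.Int.band (2*(q:Int) + b) 1 = ((2*q + b) &&& 1 : Nat) := by
      push_cast [← PySem.Int.band_natCast]; ring_nf
    have h1 : (2*q + b) &&& 1 = 2*(q &&& 0) + (b &&& 1) := pvAndAdd q 0 b 1 hb (by omega)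
    have hb1 : (b &&& 1) = b := by interval_cases b <;> decide
    have hshift : pvAltLoop (2*(q:Int) + b) ((1:Int) * 2) 0 = 2 * pvAltLoop (q:Int) 1 0 := by
      have h2 : ((1:Int)) * 2 = 2 * ((1:Nat) : Int) := by norm_num
      rw [h2]
      exact pvAltLoopShift (q+1) 1 q b (by omega) hb (by omega)
    rw [pvAltLoopAcc, hshift, hband, h1, hb1]
    by_cases hb0 : b = 0
    · subst hb0; simp [hq]; ring
    · have : ¬ (((2*(q &&& 0) + b : Nat) : Int) = 0) := by
        simp only [Nat.and_zero]
        omega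
      rw [if_neg this, if_neg (by tauto)]
      ring
  · have hq0 : q = 0 := by omega
    subst hq0
    have h1 : ¬ ((1:Int) * 2 ≤ 2*((0:Nat):Int) + b ∧ 1 ≤ (1:Int)) := by omega
    have h2 : ¬ ((1:Int) * 2 ≤ ((0:Nat):Int) ∧ 1 ≤ (1:Int)) := by omega
    rw [pvAltLoop, dif_neg h1, pvAltLoop, dif_neg h2]
    simp

-- the two recurrences agree, so the two values agree for every natural m
theorem pvMain (m : Nat) : pvCnt m = pvAltLoop (m:Int) 1 0 := by
  induction m using Nat.strong_induction_on with
  | _ m ih =>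
    rcases Nat.eq_zero_or_pos m with hm | hm
    · subst hm
      rw [pvCnt]
      have : ¬ ((1:Int) * 2 ≤ ((0:Nat):Int) ∧ 1 ≤ (1:Int)) := by omega
      rw [pvAltLoop, dif_neg this]
      simp
    · have hsplit : m = 2*(m/2) + m%2 := by omega
      have hb : m % 2 < 2 := by omega
      have hq : m/2 < m := by omega
      calc pvCnt m = pvCnt (2*(m/2) + m%2) := by rw [← hsplit]
        _ = 2 * pvCnt (m/2) + (if m%2 = 0 ∧ 1 ≤ m/2 then 1 else 0) := pvCntRec (m/2) (m%2) hb
        _ = 2 * pvAltLoop ((m/2 : Nat) : Int) 1 0 + (if m%2 = 0 ∧ 1 ≤ m/2 then 1 else 0) := by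
              rw [ih (m/2) hq]
        _ = pvAltLoop ((2*(m/2) + m%2 : Nat) : Int) 1 0 := by
              rw [show ((2*(m/2) + m%2 : Nat) : Int) = 2*((m/2 : Nat) : Int) + (m%2 : Nat) by push_cast; ring]
              rw [pvAltLoopRec (m/2) (m%2) hb]
        _ = pvAltLoop (m:Int) 1 0 := by rw [← hsplit]

-- A's loop value equals pvCnt for maximum = ↑m ≥ 1
theorem pvAside (m : Nat) (hm : 1 ≤ m) :
    (PySem.List.pyRange 0 ((m:Int) - 1) 1).foldl
      (fun c value => if meetsCriteria (value + 1) (m:Int) then c + 1 else c) 0 = pvCnt m := by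
  rw [PySem.List.pyRange_one, List.foldl_map]
  rw [show (((m:Int) - 1) - 0).toNat = m - 1 by omega]
  rw [pvFoldCount, zero_add]
  have hcount : (List.range (m-1)).countP (fun y : Nat => meetsCriteria (0 + (y:Int) + 1) (m:Int))
      = (List.range (m-1)).countP (fun k : Nat => decide (m < (k+1) ^^^ m)) := by
    apply List.countP_congr
    intro k _
    simp only [meetsCriteria, decide_eq_true_eq]
    rw [show (0 + (k:Int) + 1) = ((k+1 : Nat) : Int) by push_cast; ring, PySem.Int.bxor_natCast]
    omega
  rw [hcount, pvCountPSum (fun k => m < (k+1) ^^^ m) (m-1)]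
  have hsucc := Finset.sum_range_succ' (fun x => if m < x ^^^ m then (1:Int) else 0) (m-1)
  rw [show (m-1)+1 = m by omega] at hsucc
  unfold pvCnt
  rw [hsucc]
  simp

-- ===== VERDICT (by name: the statement is the Claim_ definition above) =====
theorem count_match_criteria_spec : Claim_equal_count_match_criteria := by
  intro maximum cache _
  unfold Spec_count_match_criteria count_match_criteria count_match_criteria_alt
  simp only []
  by_cases hc : (PySem.Dict.mk cache).contains maximum
  · simp [hc]
  · simp only [hc, Bool.not_false, if_true, if_false, Bool.false_eq_true]
    rw [pvFoldFst]
    by_cases hm : maximum ≤ 1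
    · rw [PySem.List.pyRange_one_eq_nil (by omega)]
      have : ¬ ((1:Int) * 2 ≤ maximum ∧ 1 ≤ (1:Int)) := by omega
      rw [pvAltLoop, dif_neg this]
      rfl
    · have hmn : maximum = ((maximum.toNat : Nat) : Int) := by omega
      rw [hmn, pvAside maximum.toNat (by omega), pvMain]
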